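-- pv_equiv track=rewrite | github.com/jlafayette/advent-of-code | 2020/day06/custom_customs.py | everyone_yes
-- ===== SOURCE A (Python) =====
-- def everyone_yes(group):
--     combined = group.replace("\n", "")
--     answers = set()
--     for char in combined:
--         answers.add(char)
--     count = 0
--     for a in answers:
--         if all([a in line for line in group.split()]):
--             count += 1
--     return count
-- ===== SOURCE B (Python) =====
-- def everyone_yes(group):
--     lines = group.split()
--     if not lines:
--         return 0
--     common = set(lines[0])
--     for line in lines[1:]:
--         common &= set(line)
--     return len(common)
-- ===== Notes on version B (the rewrite author's own statement) =====
-- stated objective: simpler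
-- what changed: Instead of collecting every character of the group and re-scanning all lines for each candidate character, B intersects the per-line character sets in one pass over the lines (avoiding the per-candidate rescan); it also returns 0 for a whitespace-only group.
-- intended difference: On groups consisting only of whitespace with at least one non-newline character (e.g. ' '), A counts those whitespace characters (all() over the empty line list is vacuously true) and returns a positive number, while B returns 0, the intended count of questions everyone answered yes to. — e.g. on everyone_yes(" "): A returns 1, B returns 0
import Mathlib
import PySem

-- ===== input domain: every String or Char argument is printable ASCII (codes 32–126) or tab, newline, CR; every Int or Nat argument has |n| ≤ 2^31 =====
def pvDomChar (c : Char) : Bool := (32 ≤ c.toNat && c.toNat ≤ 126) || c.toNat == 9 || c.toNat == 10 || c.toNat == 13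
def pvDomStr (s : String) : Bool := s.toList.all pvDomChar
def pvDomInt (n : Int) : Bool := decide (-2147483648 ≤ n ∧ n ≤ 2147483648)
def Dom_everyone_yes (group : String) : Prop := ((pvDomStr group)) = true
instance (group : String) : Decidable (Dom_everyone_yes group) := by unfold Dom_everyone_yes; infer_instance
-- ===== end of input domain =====

-- B replaces A's per-candidate rescan of all lines by a single intersection of per-line
-- character sets (objective: simpler); on whitespace-only groups B returns the intended 0.

-- ===== PORT A =====
def everyone_yes (group : String) : Int :=
  let combined := PySem.Str.replace group "\n" ""
  let answers := combined.toList.foldl PySem.Set.add ([] : PySem.Set Char)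
  let count := answers.foldl
    (fun count a =>
      if ((PySem.Str.split₀ group).map
            (fun line => PySem.Str.isIn (String.ofList [a]) line)).all id
      then count + 1 else count) (0 : Int)
  count

-- ===== PORT B =====
def everyone_yes_alt (group : String) : Int :=
  match PySem.Str.split₀ group with
  | [] => 0
  | l0 :: rest =>
    let common := rest.foldl
      (fun c line => PySem.Set.inter c (PySem.Set.ofList line.toList))
      (PySem.Set.ofList l0.toList)
    PySem.Set.len common

-- ===== PRECONDITION & SPEC =====
-- On groups consisting only of whitespace with at least one non-newline character, A counts
-- those whitespace characters (all() over the empty line list is vacuously true) and returns a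
-- positive number, while B returns 0, the intended count of questions everyone answered yes to.
def D_everyone_yes (group : String) : Prop :=
  (group.toList.all (fun c => PySem.Chars.isspace c) = true) ∧
  (group.toList.any (fun c => c != '\n') = true)
instance (group : String) : Decidable (D_everyone_yes group) := by
  unfold D_everyone_yes; infer_instance
def Spec_everyone_yes (group : String) (out : Int) : Prop :=
  ¬ D_everyone_yes group → out = everyone_yes_alt group
instance (group : String) (out : Int) : Decidable (Spec_everyone_yes group out) := by
  unfold Spec_everyone_yes; infer_instance
def pvDiffWitness_everyone_yes : String := " "
def pvDiffWitnessOut_everyone_yes : Int × Int := (1, 0)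

-- ===== CLAIM (what is proved, stated in full; the proofs are below) =====
def Claim_unchanged_everyone_yes : Prop :=
  ∀ (group : String), Dom_everyone_yes group → Spec_everyone_yes group (everyone_yes group)
def Claim_changed_everyone_yes : Prop :=
  Dom_everyone_yes (pvDiffWitness_everyone_yes) ∧ D_everyone_yes (pvDiffWitness_everyone_yes) ∧
  everyone_yes (pvDiffWitness_everyone_yes) = pvDiffWitnessOut_everyone_yes.1 ∧
  everyone_yes_alt (pvDiffWitness_everyone_yes) = pvDiffWitnessOut_everyone_yes.2 ∧
  pvDiffWitnessOut_everyone_yes.1 ≠ pvDiffWitnessOut_everyone_yes.2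
def Claim_exact_everyone_yes : Prop :=
  ∀ (group : String), Dom_everyone_yes group → D_everyone_yes group →
    everyone_yes group ≠ everyone_yes_alt group

-- ===== LEMMAS AND PROOFS =====

-- replace s "\n" "" deletes exactly the newline characters
theorem replace_go_newline (f : Nat) (l acc : List Char) (h : l.length ≤ f) :
    PySem.Chars.replace.go ['\n'] [] f l acc = acc.reverse ++ l.filter (· ≠ '\n') := by
  induction f generalizing l acc with
  | zero =>
    cases l with
    | nil => simp [PySem.Chars.replace.go]
    | cons c t => simp at h
  | succ f ih =>
    cases l with
    | nil => simp [PySem.Chars.replace.go]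
    | cons c t =>
      simp only [List.length_cons] at h
      by_cases hc : c = '\n'
      · subst hc
        rw [show PySem.Chars.replace.go ['\n'] [] (f+1) ('\n' :: t) acc =
            PySem.Chars.replace.go ['\n'] [] f t acc from by
          simp [PySem.Chars.replace.go, List.isPrefixOf]]
        rw [ih t acc (by omega)]
        simp
      · rw [show PySem.Chars.replace.go ['\n'] [] (f+1) (c :: t) acc =
            PySem.Chars.replace.go ['\n'] [] f t (c :: acc) from by
          simp only [PySem.Chars.replace.go, List.isPrefixOf]
          split
          next hp =>
            exfalso
            simp at hp
            exact hc hp.symm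
          next => rfl]
        rw [ih t (c :: acc) (by omega)]
        simp [hc]

theorem replace_newline (s : List Char) :
    PySem.Chars.replace s ['\n'] [] = s.filter (· ≠ '\n') := by
  rw [PySem.Chars.replace]
  simp only [List.isEmpty_cons, Bool.false_eq_true, if_false]
  exact replace_go_newline s.length s [] le_rfl

-- characters of the words of split₀ s are non-space characters of s

theorem split₀_go_mem (P : Char → Prop) (s cur : List Char) (acc : List (List Char))
    (hs : ∀ c ∈ s, PySem.Chars.isspace c = false → P c)
    (hcur : ∀ c ∈ cur, P c)
    (hacc : ∀ w ∈ acc, ∀ c ∈ w, P c) :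
    ∀ w ∈ PySem.Chars.split₀.go s cur acc, ∀ c ∈ w, P c := by
  induction s generalizing cur acc with
  | nil =>
    intro w hw
    by_cases hc : cur.isEmpty
    · simp [PySem.Chars.split₀.go, hc] at hw
      exact hacc w (by simpa using hw)
    · simp [PySem.Chars.split₀.go, hc] at hw
      rcases hw with hw | hw
      · exact fun c hc' => hacc w hw c hc'
      · subst hw; intro c hc'; exact hcur c (by simpa using hc')
  | cons a t ih =>
    by_cases ha : PySem.Chars.isspace a
    · by_cases hc : cur.isEmpty
      · rw [show PySem.Chars.split₀.go (a :: t) cur acc =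
            PySem.Chars.split₀.go t [] acc from by
          simp [PySem.Chars.split₀.go, ha, hc]]
        exact ih [] acc (fun c' hcm h => hs c' (List.mem_cons_of_mem a hcm) h) (by simp) hacc
      · rw [show PySem.Chars.split₀.go (a :: t) cur acc =
            PySem.Chars.split₀.go t [] (cur.reverse :: acc) from by
          simp [PySem.Chars.split₀.go, ha, hc]]
        refine ih [] (cur.reverse :: acc) (fun c' hcm h => hs c' (List.mem_cons_of_mem a hcm) h) (by simp) ?_
        intro w hw c hc'
        rcases List.mem_cons.mp hw with hw | hw
        · subst hw; exact hcur c (by simpa using hc')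
        · exact hacc w hw c hc'
    · rw [show PySem.Chars.split₀.go (a :: t) cur acc =
          PySem.Chars.split₀.go t (a :: cur) acc from by
        simp [PySem.Chars.split₀.go, ha]]
      refine ih (a :: cur) acc (fun c' hcm h => hs c' (List.mem_cons_of_mem a hcm) h) ?_ hacc
      intro c hc'
      rcases List.mem_cons.mp hc' with h | h
      · subst h; exact hs c (by simp) (by simpa using ha)
      · exact hcur c h

theorem split₀_chars (s : List Char) :
    ∀ w ∈ PySem.Chars.split₀ s, ∀ c ∈ w, c ∈ s ∧ PySem.Chars.isspace c = false := by
  intro w hw c hc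
  have h1 := split₀_go_mem (fun c => c ∈ s ∧ PySem.Chars.isspace c = false) s [] []
    (fun c hcm hsp => ⟨hcm, hsp⟩) (by simp) (by simp) w (by simpa [PySem.Chars.split₀] using hw) c hc
  exact h1

-- split₀ of an all-whitespace string is empty
theorem split₀_go_of_all_space (s : List Char) (acc : List (List Char))
    (hs : ∀ c ∈ s, PySem.Chars.isspace c = true) :
    PySem.Chars.split₀.go s [] acc = acc.reverse := by
  induction s generalizing acc with
  | nil => simp [PySem.Chars.split₀.go]
  | cons a t ih =>
    have ha : PySem.Chars.isspace a = true := hs a (by simp)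
    rw [show PySem.Chars.split₀.go (a :: t) [] acc = PySem.Chars.split₀.go t [] acc from by
      simp [PySem.Chars.split₀.go, ha]]
    exact ih acc (fun c hc => hs c (by simp [hc]))

theorem split₀_of_all_space (s : List Char) (hs : ∀ c ∈ s, PySem.Chars.isspace c = true) :
    PySem.Chars.split₀ s = [] := by
  simpa [PySem.Chars.split₀] using split₀_go_of_all_space s [] hs

-- conversely, an empty split₀ means every character is whitespace
theorem split₀_go_eq_nil (s cur : List Char) (acc : List (List Char))
    (h : PySem.Chars.split₀.go s cur acc = []) :
    acc = [] ∧ cur = [] ∧ ∀ c ∈ s, PySem.Chars.isspace c = true := by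
  induction s generalizing cur acc with
  | nil =>
    by_cases hc : cur.isEmpty
    · simp [PySem.Chars.split₀.go, hc] at h
      exact ⟨h, by simpa using hc, by simp⟩
    · simp [PySem.Chars.split₀.go, hc] at h
  | cons a t ih =>
    by_cases ha : PySem.Chars.isspace a
    · by_cases hc : cur.isEmpty
      · rw [show PySem.Chars.split₀.go (a :: t) cur acc = PySem.Chars.split₀.go t [] acc from by
          simp [PySem.Chars.split₀.go, ha, hc]] at h
        obtain ⟨h1, _, h3⟩ := ih [] acc h
        refine ⟨h1, by simpa using hc, ?_⟩
        intro c hcm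
        rcases List.mem_cons.mp hcm with h | h
        · subst h; exact ha
        · exact h3 c h
      · rw [show PySem.Chars.split₀.go (a :: t) cur acc =
            PySem.Chars.split₀.go t [] (cur.reverse :: acc) from by
          simp [PySem.Chars.split₀.go, ha, hc]] at h
        obtain ⟨h1, _, _⟩ := ih [] (cur.reverse :: acc) h
        simp at h1
    · rw [show PySem.Chars.split₀.go (a :: t) cur acc =
          PySem.Chars.split₀.go t (a :: cur) acc from by
        simp [PySem.Chars.split₀.go, ha]] at h
      obtain ⟨_, h2, _⟩ := ih (a :: cur) acc h
      simp at h2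

theorem split₀_eq_nil (s : List Char) (h : PySem.Chars.split₀ s = []) :
    ∀ c ∈ s, PySem.Chars.isspace c = true :=
  (split₀_go_eq_nil s [] [] (by simpa [PySem.Chars.split₀] using h)).2.2

-- [a] is an infix iff a is an element
theorem singleton_infix_iff (a : Char) (l : List Char) : [a] <:+: l ↔ a ∈ l := by
  constructor
  · rintro ⟨s, t, rfl⟩; simp
  · intro h
    obtain ⟨s, t, rfl⟩ := List.append_of_mem h
    exact ⟨s, t, by simp⟩

-- A's inner condition, as a proposition
theorem cond_iff (group : String) (a : Char) :
    (((PySem.Str.split₀ group).map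
        (fun line => PySem.Str.isIn (String.ofList [a]) line)).all id = true) ↔
      ∀ l ∈ PySem.Str.split₀ group, a ∈ l.toList := by
  simp only [List.all_map, List.all_eq_true, Function.comp, id]
  constructor
  · intro h l hl
    have := (PySem.Str.isIn_iff_infix (String.ofList [a]) l).mp (h l hl)
    simpa [singleton_infix_iff] using this
  · intro h l hl
    exact (PySem.Str.isIn_iff_infix (String.ofList [a]) l).mpr
      (by simpa [singleton_infix_iff] using h l hl)

-- A's counting loop = countP
theorem foldl_count (p : Char → Bool) (xs : List Char) (n : Int) :
    xs.foldl (fun count a => if p a then count + 1 else count) n = n + xs.countP p := by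
  induction xs generalizing n with
  | nil => simp
  | cons a t ih =>
    by_cases h : p a <;> simp [h, ih] <;> ring

-- membership and nodup of B's intersection fold
theorem foldl_inter_mem (rest : List String) (c : PySem.Set Char) (x : Char) :
    x ∈ rest.foldl (fun c line => PySem.Set.inter c (PySem.Set.ofList line.toList)) c ↔
      x ∈ c ∧ ∀ l ∈ rest, x ∈ l.toList := by
  induction rest generalizing c with
  | nil => simp
  | cons l t ih =>
    simp only [List.foldl_cons, ih, PySem.Set.mem_inter, PySem.Set.mem_ofList]
    constructor
    · rintro ⟨⟨h1, h2⟩, h3⟩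
      refine ⟨h1, ?_⟩
      intro l' hl'
      rcases List.mem_cons.mp hl' with h | h
      · subst h; exact h2
      · exact h3 l' h
    · rintro ⟨h1, h2⟩
      exact ⟨⟨h1, h2 l (List.mem_cons_self)⟩, fun l' hl' => h2 l' (List.mem_cons_of_mem _ hl')⟩

theorem foldl_inter_nodup (rest : List String) (c : PySem.Set Char) (h : List.Nodup c) :
    List.Nodup (rest.foldl (fun c line => PySem.Set.inter c (PySem.Set.ofList line.toList)) c) := by
  induction rest generalizing c with
  | nil => exact h
  | cons l t ih => exact ih _ (PySem.Set.nodup_inter _ _ h)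

-- A, computed: the number of distinct non-newline characters satisfying the inner all() test
theorem everyone_yes_eq_countP (group : String) :
    everyone_yes group =
      ((PySem.Set.ofList (group.toList.filter (· ≠ '\n'))).countP
        (fun a => ((PySem.Str.split₀ group).map
          (fun line => PySem.Str.isIn (String.ofList [a]) line)).all id) : Int) := by
  simp only [everyone_yes]
  rw [← PySem.Set.ofList_eq_foldl, PySem.Str.toList_replace]
  rw [show ("\n" : String).toList = ['\n'] from rfl,
      show ("" : String).toList = [] from rfl, replace_newline, foldl_count]
  simp

-- the main agreement, for a group whose split is nonempty
theorem main_eq (group : String) (l0 : String) (rest : List String)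
    (hL : PySem.Str.split₀ group = l0 :: rest) :
    everyone_yes group = everyone_yes_alt group := by
  have hchars : ∀ w ∈ PySem.Str.split₀ group, ∀ c ∈ w.toList,
      c ∈ group.toList ∧ PySem.Chars.isspace c = false := by
    intro w hw c hc
    have hw' : w.toList ∈ PySem.Chars.split₀ group.toList := by
      rw [← PySem.Str.split₀_map_toList]
      exact List.mem_map_of_mem hw
    exact split₀_chars group.toList w.toList hw' c hc
  -- A's answers set
  have hans : (PySem.Str.replace group "\n" "").toList.foldl PySem.Set.add ([] : PySem.Set Char)
      = PySem.Set.ofList ((group.toList.filter (· ≠ '\n'))) := by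
    rw [← PySem.Set.ofList_eq_foldl, PySem.Str.toList_replace]
    simp only [String.toList_empty]
    rw [show ("\n" : String).toList = ['\n'] from rfl, replace_newline]
  set p : Char → Bool := fun a =>
    ((PySem.Str.split₀ group).map
        (fun line => PySem.Str.isIn (String.ofList [a]) line)).all id with hp
  set I := rest.foldl (fun c line => PySem.Set.inter c (PySem.Set.ofList line.toList))
      (PySem.Set.ofList l0.toList) with hI
  have hImem : ∀ x, x ∈ I ↔ ∀ l ∈ PySem.Str.split₀ group, x ∈ l.toList := by
    intro x
    rw [hI, foldl_inter_mem, PySem.Set.mem_ofList, hL]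
    constructor
    · rintro ⟨h1, h2⟩ l hl
      rcases List.mem_cons.mp hl with h | h
      · subst h; exact h1
      · exact h2 l h
    · intro h
      exact ⟨h l0 (by simp), fun l hl => h l (by simp [hl])⟩
  have hcond_mem : ∀ x, (∀ l ∈ PySem.Str.split₀ group, x ∈ l.toList) →
      x ∈ PySem.Set.ofList ((group.toList.filter (· ≠ '\n'))) := by
    intro x hx
    have hx0 := hx l0 (by simp [hL])
    have ⟨hmem, hsp⟩ := hchars l0 (by simp [hL]) x hx0
    have hne : x ≠ '\n' := by
      intro h; subst h; simp [show PySem.Chars.isspace '\n' = true from by decide] at hsp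
    rw [PySem.Set.mem_ofList]
    simp [List.mem_filter, hmem, hne]
  -- A = countP p over answers, as a filter
  have hfilter_nodup : List.Nodup
      ((PySem.Set.ofList ((group.toList.filter (· ≠ '\n')))).filter p) :=
    List.Nodup.filter _ (PySem.Set.nodup_ofList _)
  have hperm : ((PySem.Set.ofList ((group.toList.filter (· ≠ '\n')))).filter p).Perm I := by
    rw [List.perm_ext_iff_of_nodup hfilter_nodup
      (foldl_inter_nodup rest _ (PySem.Set.nodup_ofList _))]
    intro x
    rw [List.mem_filter, hImem]
    constructor
    · rintro ⟨_, hpx⟩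
      exact (cond_iff group x).mp hpx
    · intro h
      exact ⟨hcond_mem x h, (cond_iff group x).mpr h⟩
  have hlen : ((PySem.Set.ofList ((group.toList.filter (· ≠ '\n')))).countP p) = I.length := by
    rw [List.countP_eq_length_filter]
    exact hperm.length_eq
  rw [everyone_yes_eq_countP, ← hp]
  unfold everyone_yes_alt
  rw [hL]
  simp only [← hI, PySem.Set.len, hlen]

-- ===== VERDICT (by name: the statement is the Claim_ definition above) =====
theorem everyone_yes_spec : Claim_unchanged_everyone_yes := by
  intro group _ hD
  cases hLs : PySem.Str.split₀ group with
  | cons l0 rest => exact main_eq group l0 rest hLs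
  | nil =>
    -- split is empty: every character is whitespace; ¬D_ forces them all to be '\n'
    have hall : ∀ c ∈ group.toList, PySem.Chars.isspace c = true := by
      apply split₀_eq_nil
      have := congrArg (List.map String.toList) hLs
      rwa [PySem.Str.split₀_map_toList] at this
    have hnl : ∀ c ∈ group.toList, c = '\n' := by
      by_contra hx
      push_neg at hx
      obtain ⟨c, hc, hcne⟩ := hx
      refine hD ⟨List.all_eq_true.mpr hall, List.any_eq_true.mpr ⟨c, hc, ?_⟩⟩
      simpa using hcne
    have hfilter : group.toList.filter (· ≠ '\n') = [] := by
      rw [List.filter_eq_nil_iff]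
      intro c hc
      simp [hnl c hc]
    rw [everyone_yes_eq_countP, hfilter]
    unfold everyone_yes_alt
    rw [hLs]
    simp [PySem.Set.ofList]

set_option maxRecDepth 8000 in
theorem everyone_yes_changed : Claim_changed_everyone_yes := by
  unfold Claim_changed_everyone_yes
  exact ⟨by decide, by decide, by rfl, by rfl, by decide⟩

theorem everyone_yes_tight : Claim_exact_everyone_yes := by
  intro group _ hD
  obtain ⟨hall', hany⟩ := hD
  have hall : ∀ c ∈ group.toList, PySem.Chars.isspace c = true := List.all_eq_true.mp hall'
  obtain ⟨c, hc, hcne'⟩ := List.any_eq_true.mp hany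
  have hcne : c ≠ '\n' := by simpa using hcne'
  have hL : PySem.Str.split₀ group = [] := by
    have := split₀_of_all_space group.toList hall
    have h2 := PySem.Str.split₀_map_toList group
    rw [this] at h2
    exact List.map_eq_nil_iff.mp h2
  -- B returns 0
  have hB : everyone_yes_alt group = 0 := by
    unfold everyone_yes_alt; rw [hL]
  -- A returns the number of distinct non-newline characters, which is positive
  have hA : everyone_yes group =
      ((PySem.Set.ofList ((group.toList.filter (· ≠ '\n')))).length : Int) := by
    rw [everyone_yes_eq_countP, hL]
    simp
  have hmem : c ∈ PySem.Set.ofList ((group.toList.filter (· ≠ '\n'))) := by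
    rw [PySem.Set.mem_ofList, List.mem_filter]
    simp [hc, hcne]
  have hpos : 0 < (PySem.Set.ofList ((group.toList.filter (· ≠ '\n')))).length :=
    List.length_pos_of_mem hmem
  rw [hA, hB]
  intro h
  omega
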